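-- pv_equiv track=rewrite | github.com/vivekgautham/codingchallenges | challenges/src/algos/dynamicprogramming/grid.py | mineLeftToRightUpDown
-- ===== SOURCE A (Python) =====
-- def mineLeftToRightUpDown(mineGrid):
--     opimalMineCumSum = [ [ 0 for j in range(len(mineGrid[0])) ] for i in range(len(mineGrid)) ]
--
--     for j in range(len(mineGrid[0])):
--         for i in range(len(mineGrid)):
--             if j == 0:
--                 opimalMineCumSum[i][j] = mineGrid[i][j]
--             else:
--                 opimalMineCumSum[i][j] = mineGrid[i][j] + max(
--                     opimalMineCumSum[i-1][j-1] if i-1 >= 0 else 0,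
--                     opimalMineCumSum[i][j-1],
--                     opimalMineCumSum[i+1][j-1] if i+1 < len(opimalMineCumSum) else 0
--                 )
--
--     return max([opimalMineCumSum[i][len(mineGrid)-1] for i in range(len(mineGrid))])
-- ===== SOURCE B (Python) =====
-- def mineLeftToRightUpDown(mineGrid):
--     # Top-down memoized recursion on the path recurrence instead of a table sweep.
--     memo = {}
--
--     def best(i, j):
--         if (i, j) not in memo:
--             if j == 0:
--                 memo[(i, j)] = mineGrid[i][0]
--             else:
--                 memo[(i, j)] = mineGrid[i][j] + max(
--                     best(i - 1, j - 1) if i - 1 >= 0 else 0,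
--                     best(i, j - 1),
--                     best(i + 1, j - 1) if i + 1 < len(mineGrid) else 0)
--         return memo[(i, j)]
--
--     return max(best(i, len(mineGrid) - 1) for i in range(len(mineGrid)))
-- ===== Notes on version B (the rewrite author's own statement) =====
-- stated objective: alternative
-- what changed: Replaces the bottom-up column-by-column 2D table sweep with a top-down memoized recursion best(i,j) over a dict, computing only the cells the final column's maxima depend on.
import Mathlib
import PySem

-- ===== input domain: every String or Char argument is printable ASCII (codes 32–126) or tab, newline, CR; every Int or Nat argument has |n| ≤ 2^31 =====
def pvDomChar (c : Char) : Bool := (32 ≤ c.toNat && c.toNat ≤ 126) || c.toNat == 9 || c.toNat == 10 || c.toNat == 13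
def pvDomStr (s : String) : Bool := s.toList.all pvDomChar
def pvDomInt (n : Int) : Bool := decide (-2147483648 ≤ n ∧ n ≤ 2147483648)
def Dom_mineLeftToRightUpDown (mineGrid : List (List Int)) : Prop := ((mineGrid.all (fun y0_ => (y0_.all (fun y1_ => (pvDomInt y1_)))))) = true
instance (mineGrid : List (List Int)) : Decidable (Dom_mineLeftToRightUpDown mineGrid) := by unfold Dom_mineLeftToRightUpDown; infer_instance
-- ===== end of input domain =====

-- B replaces A's bottom-up column-sweep 2D table with a top-down memoized recursion
-- best(i,j) over a dict (alternative decomposition, same values).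

-- ===== PORT A =====
-- literal transliteration of A: zero table, column-major double loop updating cells in place,
-- then max over column len(mineGrid)-1.  List accesses use getD; Pre_ excludes the inputs
-- on which the Python raises, so the defaults are never consulted under Pre_.
def mineLeftToRightUpDown (mineGrid : List (List Int)) : Int :=
  let rows := mineGrid.length
  let cols := (mineGrid.headI).length
  let init : List (List Int) := List.replicate rows (List.replicate cols 0)
  let table := (List.range cols).foldl (fun tbl j =>
    (List.range rows).foldl (fun tbl i =>
      let v : Int :=
        if j = 0 then (mineGrid.getD i []).getD j 0
        else (mineGrid.getD i []).getD j 0 +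
          max (max (if 1 ≤ i then (tbl.getD (i-1) []).getD (j-1) 0 else 0)
                   ((tbl.getD i []).getD (j-1) 0))
              (if i+1 < tbl.length then (tbl.getD (i+1) []).getD (j-1) 0 else 0)
      tbl.set i ((tbl.getD i []).set j v)) tbl) init
  (PySem.List.max? ((List.range rows).map (fun i => (table.getD i []).getD (rows-1) 0)) (fun x => x)).getD 0

-- ===== PORT B =====
-- literal transliteration of Source B's helper best(i, j): if (i,j) is not memoized, compute it
-- (recursively for j = k+1, with literal 0 for out-of-range diagonal neighbours) and store it,
-- then return memo[(i,j)]; the memo dict is threaded through as explicit state.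
def bBest (g : List (List Int)) (j i : Nat) (m : PySem.Dict (Nat × Nat) Int) :
    Int × PySem.Dict (Nat × Nat) Int :=
  let m' : PySem.Dict (Nat × Nat) Int :=
    if m.contains (i, j) then m
    else
      match j with
      | 0 => m.insert (i, 0) ((g.getD i []).getD 0 0)
      | k+1 =>
        let r1 := if 1 ≤ i then bBest g k (i-1) m else (0, m)
        let r2 := bBest g k i r1.2
        let r3 := if i+1 < g.length then bBest g k (i+1) r2.2 else (0, r2.2)
        r3.2.insert (i, k+1)
          ((g.getD i []).getD (k+1) 0 + max (max r1.1 r2.1) r3.1)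
  (m'.getD (i, j) 0, m')
termination_by j

-- one generator step: call best(i, len-1), record its value, keep the updated memo
def bStep (g : List (List Int)) (acc : List Int × PySem.Dict (Nat × Nat) Int) (i : Nat) :
    List Int × PySem.Dict (Nat × Nat) Int :=
  let r := bBest g (g.length - 1) i acc.2
  (acc.1 ++ [r.1], r.2)

-- literal transliteration of Source B's body: fold max(best(i, len-1) for i in range(len)),
-- threading the memo dict across the generator in Python's evaluation order.
def mineLeftToRightUpDown_alt (mineGrid : List (List Int)) : Int :=
  (PySem.List.max?
    (((List.range mineGrid.length).foldl (bStep mineGrid) ([], PySem.Dict.empty)).1)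
    (fun x => x)).getD 0

-- ===== PRECONDITION & SPEC =====
-- Pre_ is exactly where the Python A returns: a nonempty grid whose every row has at least
-- len(mineGrid[0]) entries and with len(mineGrid) ≤ len(mineGrid[0]) (otherwise a grid/row
-- access, or the final read of column len(mineGrid)-1, raises IndexError).
def Pre_mineLeftToRightUpDown (mineGrid : List (List Int)) : Prop :=
  mineGrid ≠ [] ∧ mineGrid.length ≤ (mineGrid.headI).length ∧
    ∀ row ∈ mineGrid, (mineGrid.headI).length ≤ row.length
instance (mineGrid : List (List Int)) : Decidable (Pre_mineLeftToRightUpDown mineGrid) := by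
  unfold Pre_mineLeftToRightUpDown; infer_instance
def pvWitness_mineLeftToRightUpDown : List (List Int) := [[1, 2], [3, 4]]

def Spec_mineLeftToRightUpDown (mineGrid : List (List Int)) (out : Int) : Prop := out = mineLeftToRightUpDown_alt mineGrid
instance (mineGrid : List (List Int)) (out : Int) : Decidable (Spec_mineLeftToRightUpDown mineGrid out) := by unfold Spec_mineLeftToRightUpDown; infer_instance

-- ===== CLAIM (what is proved, stated in full; the proofs are below) =====
def Claim_equal_mineLeftToRightUpDown : Prop := ∀ (mineGrid : List (List Int)), Dom_mineLeftToRightUpDown mineGrid → Pre_mineLeftToRightUpDown mineGrid → Spec_mineLeftToRightUpDown mineGrid (mineLeftToRightUpDown mineGrid)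

-- ===== LEMMAS AND PROOFS =====

-- the common recurrence: best path sum ending at cell (i, j)
def bestF (g : List (List Int)) (i j : Nat) : Int :=
  match j with
  | 0 => (g.getD i []).getD 0 0
  | k+1 => (g.getD i []).getD (k+1) 0 +
      max (max (if 1 ≤ i then bestF g (i-1) k else 0) (bestF g i k))
          (if i+1 < g.length then bestF g (i+1) k else 0)

lemma mapRange_getD {α : Type} (n : Nat) (f : Nat → α) (i : Nat) (d : α) :
    ((List.range n).map f).getD i d = if i < n then f i else d := by
  by_cases h : i < n <;>
    simp [List.getD_eq_getElem?_getD, h]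

lemma mapRange_set {α : Type} (n : Nat) (f : Nat → α) (i : Nat) (x : α) (h : i < n) :
    ((List.range n).map f).set i x = (List.range n).map (fun k => if k = i then x else f k) := by
  apply List.ext_getElem?
  intro k
  rw [List.getElem?_set]
  by_cases hki : i = k
  · subst hki
    simp [h]
  · by_cases hk : k < n <;> simp [hk, hki, eq_comm]

lemma foldl_range_inv {α : Type} (f : α → Nat → α) (P : Nat → α → Prop) (n : Nat) (a : α)
    (h0 : P 0 a) (hs : ∀ k b, k < n → P k b → P (k+1) (f b k)) :
    P n ((List.range n).foldl f a) := by
  induction n with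
  | zero => simpa using h0
  | succ n ih =>
    rw [List.range_succ, List.foldl_append]
    exact hs n _ (Nat.lt_succ_self n)
      (ih (fun k b hk => hs k b (Nat.lt_succ_of_lt hk)))

-- the state of A's table: columns < J fully computed, column J computed for rows < I, rest 0
def tmod (g : List (List Int)) (J I : Nat) : List (List Int) :=
  (List.range g.length).map (fun i =>
    (List.range (g.headI).length).map (fun j =>
      if j < J ∨ (j = J ∧ i < I) then bestF g i j else 0))

lemma tmod_length (g : List (List Int)) (J I : Nat) : (tmod g J I).length = g.length := by
  simp [tmod]

lemma tmod_get (g : List (List Int)) (J I i j : Nat)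
    (hi : i < g.length) (hj : j < (g.headI).length) :
    ((tmod g J I).getD i []).getD j 0 =
      if j < J ∨ (j = J ∧ i < I) then bestF g i j else 0 := by
  unfold tmod
  rw [mapRange_getD, if_pos hi, mapRange_getD, if_pos hj]

lemma tmod_step (g : List (List Int)) (j i : Nat)
    (hj : j < (g.headI).length) (hi : i < g.length) :
    (let v : Int :=
        if j = 0 then (g.getD i []).getD j 0
        else (g.getD i []).getD j 0 +
          max (max (if 1 ≤ i then ((tmod g j i).getD (i-1) []).getD (j-1) 0 else 0)
                   (((tmod g j i).getD i []).getD (j-1) 0))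
              (if i+1 < (tmod g j i).length then ((tmod g j i).getD (i+1) []).getD (j-1) 0 else 0)
     (tmod g j i).set i (((tmod g j i).getD i []).set j v)) = tmod g j (i+1) := by
  have hv :
      (if j = 0 then (g.getD i []).getD j 0
        else (g.getD i []).getD j 0 +
          max (max (if 1 ≤ i then ((tmod g j i).getD (i-1) []).getD (j-1) 0 else 0)
                   (((tmod g j i).getD i []).getD (j-1) 0))
              (if i+1 < (tmod g j i).length then ((tmod g j i).getD (i+1) []).getD (j-1) 0 else 0))
        = bestF g i j := by
    cases j with
    | zero => simp [bestF]
    | succ k =>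
      have hk : k < (g.headI).length := Nat.lt_of_succ_lt hj
      rw [if_neg (Nat.succ_ne_zero k), tmod_length]
      have h2 : ((tmod g (k+1) i).getD i []).getD (k+1-1) 0 = bestF g i k := by
        rw [tmod_get g (k+1) i i (k+1-1) hi (by simpa using hk)]
        simp
      rw [h2]
      have h1 : (if 1 ≤ i then ((tmod g (k+1) i).getD (i-1) []).getD (k+1-1) 0 else 0)
          = (if 1 ≤ i then bestF g (i-1) k else 0) := by
        by_cases h : 1 ≤ i
        · rw [if_pos h, if_pos h,
            tmod_get g (k+1) i (i-1) (k+1-1) (Nat.lt_of_le_of_lt (Nat.sub_le i 1) hi)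
              (by simpa using hk)]
          simp
        · simp [h]
      have h3 : (if i+1 < g.length then ((tmod g (k+1) i).getD (i+1) []).getD (k+1-1) 0 else 0)
          = (if i+1 < g.length then bestF g (i+1) k else 0) := by
        by_cases h : i+1 < g.length
        · rw [if_pos h, if_pos h, tmod_get g (k+1) i (i+1) (k+1-1) h (by simpa using hk)]
          simp
        · simp [h]
      rw [h1, h3]
      rfl
  show (tmod g j i).set i (((tmod g j i).getD i []).set j _) = tmod g j (i+1)
  rw [hv]
  have hrow : ((tmod g j i).getD i []) =
      (List.range (g.headI).length).map (fun j' => if j' < j ∨ (j' = j ∧ i < i) then bestF g i j' else 0) := by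
    unfold tmod
    rw [mapRange_getD, if_pos hi]
  rw [hrow, mapRange_set _ _ _ _ hj]
  unfold tmod
  rw [mapRange_set _ _ _ _ hi]
  apply List.map_congr_left
  intro i' hi'
  have hi'n : i' < g.length := List.mem_range.mp hi'
  by_cases hii : i' = i
  · subst hii
    rw [if_pos rfl]
    apply List.map_congr_left
    intro j' hj'
    by_cases hjj : j' = j
    · subst hjj
      simp
    · simp only [if_neg hjj]
      have hcond : (j' < j ∨ (j' = j ∧ i' < i')) ↔ (j' < j ∨ (j' = j ∧ i' < i' + 1)) := by
        omega
      rw [if_congr hcond rfl rfl]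
  · rw [if_neg hii]
    apply List.map_congr_left
    intro j' _
    have hcond : (j' < j ∨ (j' = j ∧ i' < i)) ↔ (j' < j ∨ (j' = j ∧ i' < i + 1)) := by
      omega
    rw [if_congr hcond rfl rfl]

lemma tmod_col_done (g : List (List Int)) (j : Nat) :
    tmod g j g.length = tmod g (j+1) 0 := by
  unfold tmod
  apply List.map_congr_left
  intro i hi
  have hin : i < g.length := List.mem_range.mp hi
  apply List.map_congr_left
  intro j' _
  have : (j' < j ∨ (j' = j ∧ i < g.length)) ↔ (j' < j + 1 ∨ (j' = j + 1 ∧ i < 0)) := by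
    omega
  rw [if_congr this rfl rfl]

lemma tmod_init (g : List (List Int)) :
    List.replicate g.length (List.replicate (g.headI).length 0) = tmod g 0 0 := by
  unfold tmod
  simp [List.map_const']

lemma aList_eq (g : List (List Int)) (hne : g ≠ []) (hrc : g.length ≤ (g.headI).length) :
    mineLeftToRightUpDown g =
      (PySem.List.max? ((List.range g.length).map (fun i => bestF g i (g.length - 1))) (fun x => x)).getD 0 := by
  unfold mineLeftToRightUpDown
  have hrows : 0 < g.length := List.length_pos_iff.mpr hne
  have htable : (List.range (g.headI).length).foldl (fun tbl j =>
      (List.range g.length).foldl (fun tbl i =>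
        let v : Int :=
          if j = 0 then (g.getD i []).getD j 0
          else (g.getD i []).getD j 0 +
            max (max (if 1 ≤ i then (tbl.getD (i-1) []).getD (j-1) 0 else 0)
                     ((tbl.getD i []).getD (j-1) 0))
                (if i+1 < tbl.length then (tbl.getD (i+1) []).getD (j-1) 0 else 0)
        tbl.set i ((tbl.getD i []).set j v)) tbl)
      (List.replicate g.length (List.replicate (g.headI).length 0))
      = tmod g (g.headI).length 0 := by
    rw [tmod_init]
    exact foldl_range_inv _ (fun J tbl => tbl = tmod g J 0) _ _ rfl
      (fun j tbl hj htbl => by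
        subst htbl
        rw [← tmod_col_done]
        exact foldl_range_inv _ (fun I tbl => tbl = tmod g j I) _ _ rfl
          (fun i tbl hi htbl => by subst htbl; exact tmod_step g j i hj hi))
  simp only []
  rw [htable]
  congr 1
  congr 1
  apply List.map_congr_left
  intro i hi
  have hin : i < g.length := List.mem_range.mp hi
  rw [tmod_get g (g.headI).length 0 i (g.length - 1) hin (by omega)]
  rw [if_pos (Or.inl (by omega))]

-- B side: the memo invariant
def MInv (g : List (List Int)) (m : PySem.Dict (Nat × Nat) Int) : Prop :=
  ∀ i j v, m.get? (i, j) = some v → v = bestF g i j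

lemma bBest_correct (g : List (List Int)) :
    ∀ (j i : Nat) (m : PySem.Dict (Nat × Nat) Int), MInv g m →
      (bBest g j i m).1 = bestF g i j ∧ MInv g (bBest g j i m).2 := by
  intro j
  induction j using Nat.strong_induction_on with
  | _ j ih =>
    intro i m hm
    by_cases hc : m.contains (i, j)
    · have hsome : (m.get? (i, j)).isSome := by
        rw [← PySem.Dict.contains_eq_isSome_get?]; exact hc
      obtain ⟨v, hv⟩ := Option.isSome_iff_exists.mp hsome
      have : (bBest g j i m) = (m.getD (i, j) 0, m) := by
        cases j <;> simp [bBest, hc]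
      rw [this]
      refine ⟨?_, hm⟩
      rw [PySem.Dict.getD_eq_get?_getD, hv]
      exact hm i j v hv
    · cases j with
      | zero =>
        have hstep : bBest g 0 i m =
            ((m.insert (i, 0) ((g.getD i []).getD 0 0)).getD (i, 0) 0,
              m.insert (i, 0) ((g.getD i []).getD 0 0)) := by
          simp [bBest, hc]
        rw [hstep]
        constructor
        · rw [PySem.Dict.getD_insert_self]; rfl
        · intro i' j' v hv
          rw [PySem.Dict.get?_insert] at hv
          by_cases he : (i', j') = (i, 0)
          · rw [if_pos he] at hv
            cases he
            cases hv; rfl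
          · rw [if_neg he] at hv
            exact hm i' j' v hv
      | succ k =>
        have hk : k < k + 1 := Nat.lt_succ_self k
        have h1 : (if 1 ≤ i then bBest g k (i-1) m else (0, m)).1 =
            (if 1 ≤ i then bestF g (i-1) k else 0) ∧
            MInv g (if 1 ≤ i then bBest g k (i-1) m else (0, m)).2 := by
          by_cases h : 1 ≤ i
          · simp only [if_pos h]; exact ih k hk (i-1) m hm
          · simp only [if_neg h]; exact ⟨by simp, hm⟩
        set r1 := if 1 ≤ i then bBest g k (i-1) m else (0, m) with hr1
        have h2 := ih k hk i r1.2 h1.2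
        set r2 := bBest g k i r1.2 with hr2
        have h3 : (if i+1 < g.length then bBest g k (i+1) r2.2 else (0, r2.2)).1 =
            (if i+1 < g.length then bestF g (i+1) k else 0) ∧
            MInv g (if i+1 < g.length then bBest g k (i+1) r2.2 else (0, r2.2)).2 := by
          by_cases h : i+1 < g.length
          · simp only [if_pos h]; exact ih k hk (i+1) r2.2 h2.2
          · simp only [if_neg h]; exact ⟨by simp, h2.2⟩
        set r3 := if i+1 < g.length then bBest g k (i+1) r2.2 else (0, r2.2) with hr3
        have hval : ((g.getD i []).getD (k+1) 0 + max (max r1.1 r2.1) r3.1) = bestF g i (k+1) := by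
          rw [h1.1, h2.1, h3.1]; rfl
        have hstep : bBest g (k+1) i m =
            ((r3.2.insert (i, k+1) ((g.getD i []).getD (k+1) 0 + max (max r1.1 r2.1) r3.1)).getD (i, k+1) 0,
              r3.2.insert (i, k+1) ((g.getD i []).getD (k+1) 0 + max (max r1.1 r2.1) r3.1)) := by
          rw [bBest]
          simp only [hc, if_neg, Bool.false_eq_true, not_false_eq_true, ← hr1, ← hr2, ← hr3]
        rw [hstep]
        constructor
        · rw [PySem.Dict.getD_insert_self, hval]
        · intro i' j' v hv
          rw [PySem.Dict.get?_insert] at hv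
          by_cases he : (i', j') = (i, k+1)
          · rw [if_pos he] at hv
            cases he
            cases hv
            exact hval.symm ▸ rfl
          · rw [if_neg he] at hv
            exact h3.2 i' j' v hv

lemma bList_eq (g : List (List Int)) :
    mineLeftToRightUpDown_alt g =
      (PySem.List.max? ((List.range g.length).map (fun i => bestF g i (g.length - 1))) (fun x => x)).getD 0 := by
  unfold mineLeftToRightUpDown_alt
  have hfold : ((List.range g.length).foldl (bStep g) ([], PySem.Dict.empty)).1
      = (List.range g.length).map (fun i => bestF g i (g.length - 1)) := by
    have := foldl_range_inv (bStep g)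
      (fun k acc => acc.1 = (List.range k).map (fun i => bestF g i (g.length - 1)) ∧ MInv g acc.2)
      g.length ([], PySem.Dict.empty)
      ⟨by simp, fun i j v hv => by simp [PySem.Dict.get?_empty] at hv⟩
      (fun k acc hk hacc => by
        have hb := bBest_correct g (g.length - 1) k acc.2 hacc.2
        refine ⟨?_, hb.2⟩
        show (acc.1 ++ [(bBest g (g.length - 1) k acc.2).1]) = _
        rw [hacc.1, hb.1, List.range_succ, List.map_append, List.map_singleton])
    exact this.1
  rw [hfold]

-- ===== VERDICT (by name: the statement is the Claim_ definition above) =====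
theorem mineLeftToRightUpDown_spec : Claim_equal_mineLeftToRightUpDown := by
  intro g _ hpre
  obtain ⟨hne, hrc, _⟩ := hpre
  unfold Spec_mineLeftToRightUpDown
  rw [aList_eq g hne hrc, bList_eq g]
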